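-- pv_equiv track=rewrite | github.com/maumneto/exercicio-python | projetos-rapidos/cryptoMessage.py | decipherWord
-- ===== SOURCE A (Python) =====
-- import string as str
--
-- def decipherWord(cipherWord, key):
--     alph = list(str.ascii_lowercase)
--     cipherWord = list(cipherWord)
--     newWord = []
--
--     for i in range(len(cipherWord)):
--         for j in range(len(alph)):
--             if (alph[j] == cipherWord[i]):
--                 newWord.append(alph[j - key])
--
--     cryptoWord = ''.join(newWord)
--     return cryptoWord
-- ===== SOURCE B (Python) =====
-- def decipherWord(cipherWord, key):
--     return ''.join(chr(97 + (ord(c) - 97 - key) % 26)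
--                    for c in cipherWord if 'a' <= c <= 'z')
-- ===== Notes on version B (the rewrite author's own statement) =====
-- stated objective: simpler
-- what changed: Replaces A's inner 26-element alphabet scan and list-index wraparound with a single pass computing each output letter directly as chr(97 + (ord(c)-97-key) % 26).
import Mathlib
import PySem

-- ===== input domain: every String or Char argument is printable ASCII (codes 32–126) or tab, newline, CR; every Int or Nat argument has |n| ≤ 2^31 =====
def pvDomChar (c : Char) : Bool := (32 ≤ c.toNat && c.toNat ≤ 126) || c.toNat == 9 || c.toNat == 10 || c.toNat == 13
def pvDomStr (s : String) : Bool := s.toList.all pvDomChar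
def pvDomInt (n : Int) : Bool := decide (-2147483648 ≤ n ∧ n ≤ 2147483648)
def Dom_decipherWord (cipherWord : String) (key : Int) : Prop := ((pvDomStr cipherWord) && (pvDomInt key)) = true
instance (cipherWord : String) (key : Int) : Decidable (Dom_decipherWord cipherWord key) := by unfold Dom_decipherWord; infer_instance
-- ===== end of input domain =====

-- B replaces A's inner 26-element alphabet scan (and its list-index wraparound) by one
-- arithmetic pass using (ord(c)-97-key) % 26 — simpler/idiomatic, same values on Pre_.

-- ===== PORT A =====
-- list(string.ascii_lowercase)
def pyAlph : List Char :=
  ['a','b','c','d','e','f','g','h','i','j','k','l','m',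
   'n','o','p','q','r','s','t','u','v','w','x','y','z']

-- Literal port of A: for each input char, scan all 26 alphabet positions; on a match,
-- append alph[j - key] (Python list indexing -> PySem.List.pyGet?; `.getD ' '` only
-- stands where Python would raise IndexError, which Pre_ excludes).
def decipherWord (cipherWord : String) (key : Int) : String :=
  let cs := cipherWord.toList
  let newWord : List Char :=
    cs.foldl (fun acc c =>
      (List.range pyAlph.length).foldl (fun acc2 j =>
        if pyAlph.getD j ' ' == c then
          acc2 ++ [(PySem.List.pyGet? pyAlph ((j : Int) - key)).getD ' ']
        else acc2) acc) []
  String.mk newWord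

-- ===== PORT B =====
-- Literal port of B: filter the lowercase letters, map each through the mod-26 formula.
def decipherWord_alt (cipherWord : String) (key : Int) : String :=
  String.mk ((cipherWord.toList.filter (fun c => decide ('a' ≤ c ∧ c ≤ 'z'))).map
    (fun c => Char.ofNat (97 + (PySem.Int.mod ((c.toNat : Int) - 97 - key) 26)).toNat))

-- ===== PRECONDITION & SPEC =====
-- Pre_ excludes exactly the inputs where A raises IndexError: some lowercase letter whose
-- alphabet position minus key falls outside Python's valid list-index range [-26, 25].
def Pre_decipherWord (cipherWord : String) (key : Int) : Prop :=
  (cipherWord.toList.all fun c =>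
    !(decide ('a' ≤ c ∧ c ≤ 'z')) ||
      (decide (-26 ≤ (c.toNat : Int) - 97 - key) && decide ((c.toNat : Int) - 97 - key ≤ 25))) = true
instance (cipherWord : String) (key : Int) : Decidable (Pre_decipherWord cipherWord key) := by
  unfold Pre_decipherWord; infer_instance

def pvWitness_decipherWord : String × Int := ("khoor", 3)

def Spec_decipherWord (cipherWord : String) (key : Int) (out : String) : Prop := out = decipherWord_alt cipherWord key
instance (cipherWord : String) (key : Int) (out : String) : Decidable (Spec_decipherWord cipherWord key out) := by unfold Spec_decipherWord; infer_instance

-- ===== CLAIM (what is proved, stated in full; the proofs are below) =====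
def Claim_equal_decipherWord : Prop := ∀ (cipherWord : String) (key : Int), Dom_decipherWord cipherWord key → Pre_decipherWord cipherWord key → Spec_decipherWord cipherWord key (decipherWord cipherWord key)

-- ===== LEMMAS AND PROOFS =====

-- Valid Python indexing into the alphabet agrees with the mod-26 formula.
lemma pyGet_alph (i : Int) (h1 : -26 ≤ i) (h2 : i ≤ 25) :
    PySem.List.pyGet? pyAlph i = some (Char.ofNat (97 + (PySem.Int.mod i 26)).toNat) := by
  interval_cases i <;> decide

-- Which alphabet indices match a given character.
lemma filter_alph (c : Char) :
    (List.range pyAlph.length).filter (fun j => pyAlph.getD j ' ' == c)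
      = if 'a' ≤ c ∧ c ≤ 'z' then [c.toNat - 97] else [] := by
  by_cases h : 'a' ≤ c ∧ c ≤ 'z'
  · obtain ⟨h1, h2⟩ := h
    have hl : 97 ≤ c.toNat := h1
    have hr : c.toNat ≤ 122 := h2
    obtain ⟨n, hn⟩ : ∃ n, c.toNat = n := ⟨_, rfl⟩
    have hc : c = Char.ofNat n := by rw [← hn, Char.ofNat_toNat]
    subst hc
    rw [hn] at hl hr ⊢
    interval_cases n <;> decide
  · rw [if_neg h]
    rw [List.filter_eq_nil_iff]
    intro j hj
    have hj' : j < 26 := by simpa [pyAlph] using hj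
    simp only [pyAlph]
    interval_cases j <;>
      · simp only [List.getD, beq_iff_eq, List.getElem?_cons_zero, List.getElem?_cons_succ,
          Option.getD_some]
        rintro rfl
        exact h (by decide)

-- One input character: A's inner 26-scan appends exactly B's character (or nothing).
lemma inner_scan (c : Char) (key : Int) (acc : List Char)
    (hpre : ('a' ≤ c ∧ c ≤ 'z') → -26 ≤ (c.toNat : Int) - 97 - key ∧ (c.toNat : Int) - 97 - key ≤ 25) :
    (List.range pyAlph.length).foldl (fun acc2 j =>
        if pyAlph.getD j ' ' == c then
          acc2 ++ [(PySem.List.pyGet? pyAlph ((j : Int) - key)).getD ' ']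
        else acc2) acc
      = acc ++ (if 'a' ≤ c ∧ c ≤ 'z' then
          [Char.ofNat (97 + (PySem.Int.mod ((c.toNat : Int) - 97 - key) 26)).toNat] else []) := by
  rw [PySem.List.foldl_append_if, filter_alph]
  by_cases h : 'a' ≤ c ∧ c ≤ 'z'
  · rw [if_pos h, if_pos h]
    obtain ⟨hb1, hb2⟩ := hpre h
    have hl : 97 ≤ c.toNat := h.1
    have hcast : ((c.toNat - 97 : Nat) : Int) - key = (c.toNat : Int) - 97 - key := by
      push_cast [Nat.cast_sub hl]; ring
    simp only [List.map_cons, List.map_nil, hcast,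
      pyGet_alph _ (by omega) (by omega), Option.getD_some]
  · rw [if_neg h, if_neg h, List.map_nil]

-- The outer loop, generalized over the accumulator.
lemma outer_loop (cs : List Char) (key : Int) (acc : List Char)
    (hpre : ∀ c ∈ cs, ('a' ≤ c ∧ c ≤ 'z') →
      -26 ≤ (c.toNat : Int) - 97 - key ∧ (c.toNat : Int) - 97 - key ≤ 25) :
    cs.foldl (fun acc c =>
        (List.range pyAlph.length).foldl (fun acc2 j =>
          if pyAlph.getD j ' ' == c then
            acc2 ++ [(PySem.List.pyGet? pyAlph ((j : Int) - key)).getD ' ']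
          else acc2) acc) acc
      = acc ++ (cs.filter (fun c => decide ('a' ≤ c ∧ c ≤ 'z'))).map
          (fun c => Char.ofNat (97 + (PySem.Int.mod ((c.toNat : Int) - 97 - key) 26)).toNat) := by
  induction cs generalizing acc with
  | nil => simp
  | cons c cs ih =>
    simp only [List.foldl_cons]
    rw [inner_scan c key acc (hpre c (List.mem_cons_self)),
      ih _ (fun d hd => hpre d (List.mem_cons_of_mem _ hd)), List.filter_cons]
    by_cases h : 'a' ≤ c ∧ c ≤ 'z' <;> simp [h]

-- ===== VERDICT (by name: the statement is the Claim_ definition above) =====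
theorem decipherWord_spec : Claim_equal_decipherWord := by
  intro cipherWord key _ hpre
  have hpre' : ∀ c ∈ cipherWord.toList, ('a' ≤ c ∧ c ≤ 'z') →
      -26 ≤ (c.toNat : Int) - 97 - key ∧ (c.toNat : Int) - 97 - key ≤ 25 := by
    intro c hc hlz
    have := List.all_eq_true.mp hpre c hc
    simp only [Bool.or_eq_true, Bool.not_eq_eq_eq_not, Bool.and_eq_true, decide_eq_true_eq,
      Bool.not_true, decide_eq_false_iff_not] at this
    tauto
  show _ = _
  simp only [decipherWord, decipherWord_alt]
  rw [outer_loop _ _ _ hpre', List.nil_append]
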